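-- pv_equiv track=rewrite | github.com/100-hours-a-week/15-team-service-ai | app/domain/resume/service.py | _filter_and_sort_dependencies
-- ===== SOURCE A (Python) =====
-- EXCLUDE_PATTERNS = [
--     "test",
--     "pytest",
--     "junit",
--     "mockito",
--     "jest",
--     "mocha",
--     "vitest",
--     "eslint",
--     "prettier",
--     "ruff",
--     "black",
--     "flake8",
--     "mypy",
--     "types-",
--     "@types/",
--     "pre-commit",
--     "husky",
--     "lint-staged",
-- ]
--
-- PRIORITY_PATTERNS = [
--     "fastapi",
--     "flask",
--     "django",
--     "uvicorn",
--     "pydantic",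
--     "sqlalchemy",
--     "celery",
--     "spring",
--     "quarkus",
--     "jpa",
--     "hibernate",
--     "lombok",
--     "querydsl",
--     "mapstruct",
--     "react",
--     "vue",
--     "angular",
--     "next",
--     "nuxt",
--     "express",
--     "nestjs",
--     "prisma",
--     "typeorm",
--     "redis",
--     "kafka",
--     "rabbitmq",
-- ]
--
-- def _filter_and_sort_dependencies(deps: list[str]) -> list[str]:
--     """의존성 필터링 및 우선순위 정렬
--
--     Args:
--         deps: 원본 의존성 리스트
--
--     Returns:
--         필터링되고 정렬된 의존성 리스트
--     """
--     filtered = []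
--     for dep in deps:
--         dep_lower = dep.lower()
--         should_exclude = any(pattern in dep_lower for pattern in EXCLUDE_PATTERNS)
--         if not should_exclude:
--             filtered.append(dep)
--
--     def priority_key(dep: str) -> int:
--         dep_lower = dep.lower()
--         for i, pattern in enumerate(PRIORITY_PATTERNS):
--             if pattern in dep_lower:
--                 return i
--         return len(PRIORITY_PATTERNS)
--
--     sorted_deps = sorted(filtered, key=priority_key)
--     return sorted_deps
-- ===== SOURCE B (Python) =====
-- EXCLUDE_PATTERNS = [
--     "test", "pytest", "junit", "mockito", "jest", "mocha", "vitest",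
--     "eslint", "prettier", "ruff", "black", "flake8", "mypy", "types-",
--     "@types/", "pre-commit", "husky", "lint-staged",
-- ]
--
-- PRIORITY_PATTERNS = [
--     "fastapi", "flask", "django", "uvicorn", "pydantic", "sqlalchemy",
--     "celery", "spring", "quarkus", "jpa", "hibernate", "lombok",
--     "querydsl", "mapstruct", "react", "vue", "angular", "next", "nuxt",
--     "express", "nestjs", "prisma", "typeorm", "redis", "kafka", "rabbitmq",
-- ]
--
--
-- def _filter_and_sort_dependencies(deps: list[str]) -> list[str]:
--     """Bucket sort over the fixed priority categories instead of a comparison sort."""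
--     filtered = [dep for dep in deps
--                 if not any(p in dep.lower() for p in EXCLUDE_PATTERNS)]
--     buckets = [[] for _ in range(len(PRIORITY_PATTERNS) + 1)]
--     for dep in filtered:
--         low = dep.lower()
--         i = 0
--         while i < len(PRIORITY_PATTERNS) and PRIORITY_PATTERNS[i] not in low:
--             i += 1
--         buckets[i].append(dep)
--     return [dep for b in buckets for dep in b]
-- ===== Notes on version B (the rewrite author's own statement) =====
-- stated objective: alternative
-- what changed: Replaces sorted() with a priority_key by a stable bucket sort: each kept dependency is appended to the bucket of its first matching priority pattern (last bucket for no match) and the buckets are concatenated in index order.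
import Mathlib
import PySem

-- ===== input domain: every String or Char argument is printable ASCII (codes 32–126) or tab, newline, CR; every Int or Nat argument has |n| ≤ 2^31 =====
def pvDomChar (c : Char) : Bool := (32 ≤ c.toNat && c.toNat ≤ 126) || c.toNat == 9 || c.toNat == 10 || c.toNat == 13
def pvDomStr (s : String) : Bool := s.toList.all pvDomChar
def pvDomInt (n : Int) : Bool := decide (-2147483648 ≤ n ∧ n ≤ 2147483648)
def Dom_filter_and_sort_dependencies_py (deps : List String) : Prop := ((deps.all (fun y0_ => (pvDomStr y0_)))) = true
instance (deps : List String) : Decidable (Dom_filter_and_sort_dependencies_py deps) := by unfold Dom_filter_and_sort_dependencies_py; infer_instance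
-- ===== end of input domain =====

-- B replaces the comparison sort by a stable bucket sort over the fixed priority categories (same return value; alternative algorithm).

-- module constants shared by both programs
def pvEXCLUDE_PATTERNS : List String :=
  ["test", "pytest", "junit", "mockito", "jest", "mocha", "vitest",
   "eslint", "prettier", "ruff", "black", "flake8", "mypy", "types-",
   "@types/", "pre-commit", "husky", "lint-staged"]

def pvPRIORITY_PATTERNS : List String :=
  ["fastapi", "flask", "django", "uvicorn", "pydantic", "sqlalchemy",
   "celery", "spring", "quarkus", "jpa", "hibernate", "lombok",
   "querydsl", "mapstruct", "react", "vue", "angular", "next", "nuxt",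
   "express", "nestjs", "prisma", "typeorm", "redis", "kafka", "rabbitmq"]

-- ===== PORT A =====
-- 'for i, pattern in enumerate(PRIORITY_PATTERNS): if pattern in dep_lower: return i / return len(...)'
def pvPriorityKeyGo : List (Int × String) → String → Int
  | [], _ => (pvPRIORITY_PATTERNS.length : Int)
  | (i, pat) :: rest, depLower =>
      if PySem.Str.isIn pat depLower then i else pvPriorityKeyGo rest depLower

def pvPriorityKey (dep : String) : Int :=
  pvPriorityKeyGo (PySem.List.enumerate pvPRIORITY_PATTERNS) (PySem.Str.lower dep)

def filter_and_sort_dependencies_py (deps : List String) : List String :=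
  let filtered := deps.foldl (fun acc dep =>
    let depLower := PySem.Str.lower dep
    let shouldExclude := pvEXCLUDE_PATTERNS.any (fun pattern => PySem.Str.isIn pattern depLower)
    if shouldExclude then acc else acc ++ [dep]) []
  PySem.List.sorted filtered pvPriorityKey false

-- ===== PORT B =====
-- 'i = 0; while i < len(PRIORITY_PATTERNS) and PRIORITY_PATTERNS[i] not in low: i += 1'
def pvFirstIdx : List String → String → Nat
  | [], _ => 0
  | pat :: rest, low => if PySem.Str.isIn pat low then 0 else 1 + pvFirstIdx rest low

def pvBucketAdd (bs : List (List String)) (j : Nat) (dep : String) : List (List String) :=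
  bs.set j (bs.getD j [] ++ [dep])

def filter_and_sort_dependencies_py_alt (deps : List String) : List String :=
  let filtered := deps.filter (fun dep =>
    !(pvEXCLUDE_PATTERNS.any (fun p => PySem.Str.isIn p (PySem.Str.lower dep))))
  let buckets := filtered.foldl
    (fun bs dep => pvBucketAdd bs (pvFirstIdx pvPRIORITY_PATTERNS (PySem.Str.lower dep)) dep)
    (List.replicate (pvPRIORITY_PATTERNS.length + 1) [])
  buckets.flatten

-- ===== PRECONDITION & SPEC =====
def Spec_filter_and_sort_dependencies_py (deps : List String) (out : List String) : Prop := out = filter_and_sort_dependencies_py_alt deps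
instance (deps : List String) (out : List String) : Decidable (Spec_filter_and_sort_dependencies_py deps out) := by unfold Spec_filter_and_sort_dependencies_py; infer_instance

-- ===== CLAIM (what is proved, stated in full; the proofs are below) =====
def Claim_equal_filter_and_sort_dependencies_py : Prop := ∀ (deps : List String), Dom_filter_and_sort_dependencies_py deps → Spec_filter_and_sort_dependencies_py deps (filter_and_sort_dependencies_py deps)

-- ===== LEMMAS AND PROOFS =====

-- abbreviation for B's bucket key on an arbitrary element
def pvKeyN (dep : String) : Nat := pvFirstIdx pvPRIORITY_PATTERNS (PySem.Str.lower dep)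

theorem pvFirstIdx_le (l : List String) (low : String) : pvFirstIdx l low ≤ l.length := by
  induction l with
  | nil => simp [pvFirstIdx]
  | cons p rest ih =>
    simp only [pvFirstIdx]
    split
    · simp
    · simp only [List.length_cons]; omega

theorem pvKey_eq (dep : String) : pvPriorityKey dep = (pvKeyN dep : Int) := by
  unfold pvPriorityKey pvKeyN
  generalize PySem.Str.lower dep = low
  have h : ∀ (l : List String) (s : Int), 0 ≤ s →
      pvPriorityKeyGo (PySem.List.enumerate l s) low = s + (pvFirstIdx l low : Int) ∨
      (pvPriorityKeyGo (PySem.List.enumerate l s) low = (pvPRIORITY_PATTERNS.length : Int) ∧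
        pvFirstIdx l low = l.length) := by
    intro l
    induction l with
    | nil => intro s _; right; simp [PySem.List.enumerate_nil, pvPriorityKeyGo, pvFirstIdx]
    | cons p rest ih =>
      intro s hs
      rw [PySem.List.enumerate_cons]
      simp only [pvPriorityKeyGo, pvFirstIdx]
      by_cases hp : PySem.Chars.isIn p.toList low.toList = true
      · left; simp [hp]
      · simp only [PySem.Str.isIn_eq, hp, if_false, Bool.false_eq_true]
        rcases ih (s + 1) (by omega) with h1 | ⟨h1, h2⟩
        · left; rw [h1]; push_cast; ring
        · right; exact ⟨h1, by rw [h2, List.length_cons]; omega⟩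
  rcases h pvPRIORITY_PATTERNS 0 le_rfl with h1 | ⟨h1, h2⟩
  · rw [h1]; ring
  · rw [h1, h2]

theorem pvKeyN_lt (dep : String) : pvKeyN dep < pvPRIORITY_PATTERNS.length + 1 := by
  have := pvFirstIdx_le pvPRIORITY_PATTERNS (PySem.Str.lower dep)
  unfold pvKeyN; omega

-- insertBy passes over a block of elements it does not go before
theorem insertBy_append_left {α : Type} (before : α → α → Bool) (x : α) (b ys : List α)
    (h : ∀ y ∈ b, before x y = false) :
    PySem.List.insertBy before x (b ++ ys) = b ++ PySem.List.insertBy before x ys := by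
  induction b with
  | nil => simp
  | cons z zs ih =>
    simp only [List.cons_append, PySem.List.insertBy]
    rw [h z (by simp), ih (fun y hy => h y (by simp [hy]))]
    cases zs ++ PySem.List.insertBy before x ys <;> simp

theorem insertBy_all_before {α : Type} (before : α → α → Bool) (x : α) (ys : List α)
    (h : ∀ y ∈ ys, before x y = true) :
    PySem.List.insertBy before x ys = x :: ys := by
  cases ys with
  | nil => rfl
  | cons z zs => simp [PySem.List.insertBy, h z (by simp)]

-- inserting into the flattened buckets = appending into the right bucket
theorem insert_flatten (x : String) (bs : List (List String)) (base j : Nat)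
    (hj : j < bs.length) (hkey : pvKeyN x = base + j)
    (hb : ∀ i (hi : i < bs.length), ∀ y ∈ bs[i], pvKeyN y = base + i) :
    PySem.List.insertBy (fun a b => decide (pvKeyN a < pvKeyN b)) x bs.flatten
      = (pvBucketAdd bs j x).flatten := by
  induction bs generalizing base j with
  | nil => simp at hj
  | cons b rest ih =>
    cases j with
    | zero =>
      have hbase : ∀ y ∈ b, pvKeyN y = base := by
        intro y hy; simpa using hb 0 (by simp) y (by simpa using hy)
      have hrest : ∀ y ∈ rest.flatten, base < pvKeyN y := by
        intro y hy
        rcases List.mem_flatten.1 hy with ⟨l, hl, hyl⟩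
        rcases List.mem_iff_getElem.1 hl with ⟨i, hi, rfl⟩
        have := hb (i + 1) (by simpa using Nat.succ_lt_succ hi) y (by simpa using hyl)
        omega
      simp only [pvBucketAdd, List.getD_cons_zero, List.set_cons_zero, List.flatten_cons]
      rw [insertBy_append_left _ _ _ _ (by intro y hy; simp [hbase y hy, hkey])]
      rw [insertBy_all_before _ _ _ (by intro y hy; simp [hkey]; exact hrest y hy)]
      simp
    | succ j' =>
      have hbase : ∀ y ∈ b, pvKeyN y = base := by
        intro y hy; simpa using hb 0 (by simp) y (by simpa using hy)
      simp only [pvBucketAdd, List.getD_cons_succ, List.set_cons_succ, List.flatten_cons]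
      rw [insertBy_append_left _ _ _ _ (by intro y hy; simp [hbase y hy, hkey])]
      rw [ih (base + 1) j' (by simpa using hj) (by omega)
        (by intro i hi y hy
            have := hb (i + 1) (by simpa using Nat.succ_lt_succ hi) y (by simpa using hy)
            omega)]
      rfl

theorem fold_buckets (xs : List String) :
    ∀ (bs : List (List String)),
      (∀ i (hi : i < bs.length), ∀ y ∈ bs[i], pvKeyN y = i) →
      (∀ x ∈ xs, pvKeyN x < bs.length) →
      xs.foldl (fun acc x => PySem.List.insertBy (fun a b => decide (pvKeyN a < pvKeyN b)) x acc)
        bs.flatten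
        = (xs.foldl (fun bs x => pvBucketAdd bs (pvKeyN x) x) bs).flatten := by
  induction xs with
  | nil => intro bs _ _; rfl
  | cons x rest ih =>
    intro bs hb hlt
    simp only [List.foldl_cons]
    rw [insert_flatten x bs 0 (pvKeyN x) (hlt x (by simp)) (by omega)
      (by intro i hi y hy; simpa using hb i hi y hy)]
    rw [ih]
    · intro i hi y hy
      by_cases hix : i = pvKeyN x
      · subst hix
        have hilt : pvKeyN x < bs.length := by simpa [pvBucketAdd] using hi
        simp only [pvBucketAdd, List.getElem_set_self] at hy
        rcases List.mem_append.1 hy with h1 | h1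
        · exact hb _ hilt y (by simpa [List.getD_eq_getElem?_getD, List.getElem?_eq_getElem hilt] using h1)
        · simp at h1; subst h1; rfl
      · simp only [pvBucketAdd] at hy hi
        rw [List.getElem_set_ne (by omega)] at hy
        exact hb i (by simpa using hi) y hy
    · intro z hz
      simpa [pvBucketAdd] using hlt z (by simp [hz])

theorem foldl_keep {α : Type} (p : α → Bool) (l : List α) : ∀ acc : List α,
    l.foldl (fun acc x => if p x then acc else acc ++ [x]) acc
      = acc ++ l.filter (fun x => !p x) := by
  induction l with
  | nil => simp
  | cons x rest ih =>
    intro acc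
    cases hp : p x <;> simp [hp, ih]

theorem flatten_replicate_nil (n : Nat) :
    (List.replicate n ([] : List String)).flatten = [] := by
  induction n with
  | zero => rfl
  | succ m ih => simp [List.replicate_succ, ih]

-- ===== VERDICT (by name: the statement is the Claim_ definition above) =====
theorem filter_and_sort_dependencies_py_spec : Claim_equal_filter_and_sort_dependencies_py := by
  intro deps _
  show filter_and_sort_dependencies_py deps = filter_and_sort_dependencies_py_alt deps
  show PySem.List.sorted
      (deps.foldl (fun acc dep =>
        if pvEXCLUDE_PATTERNS.any (fun pattern => PySem.Str.isIn pattern (PySem.Str.lower dep))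
        then acc else acc ++ [dep]) [])
      pvPriorityKey false
    = ((deps.filter (fun dep =>
        !(pvEXCLUDE_PATTERNS.any (fun p => PySem.Str.isIn p (PySem.Str.lower dep))))).foldl
        (fun bs dep => pvBucketAdd bs (pvFirstIdx pvPRIORITY_PATTERNS (PySem.Str.lower dep)) dep)
        (List.replicate (pvPRIORITY_PATTERNS.length + 1) [])).flatten
  rw [foldl_keep]
  simp only [List.nil_append]
  generalize deps.filter _ = filtered
  rw [PySem.List.sorted_eq_foldl_insertBy]
  have hbefore : (fun (a b : String) => decide (pvPriorityKey a < pvPriorityKey b))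
      = (fun a b => decide (pvKeyN a < pvKeyN b)) := by
    funext a b
    simp [pvKey_eq]
  rw [hbefore]
  conv_lhs => rw [show ([] : List String)
    = (List.replicate (pvPRIORITY_PATTERNS.length + 1) ([] : List String)).flatten
    from (flatten_replicate_nil _).symm]
  rw [fold_buckets filtered (List.replicate (pvPRIORITY_PATTERNS.length + 1) [])
    (by intro i hi y hy; simp [List.getElem_replicate] at hy)
    (by intro x _; simpa using pvKeyN_lt x)]
  simp only [pvKeyN]
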